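-- pv_equiv track=rewrite | github.com/Yaxuan-w/Kropki-Sudoku | backtrack_alg.py | check_kropki
-- ===== SOURCE A (Python) =====
-- def check_kropki(relations, domains, changed):
--     # Handle Kropki constraints
--     for (cell1, cell2), constraint in relations.items():
--         # For each value in first cell's domain
--         for v1 in list(domains[cell1]):
--             valid = False
--             # Checking if there's compatible value in second cell's domain
--             for v2 in domains[cell2]:
--                 if constraint == 1 and abs(v1 - v2) == 1:
--                     valid = True
--                     break
--                 elif constraint == 2 and (v1 == 2 * v2 or v2 == 2 * v1):
--                     valid = True
--                     break
--             if not valid: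
--                 domains[cell1].remove(v1)
--                 changed = True
--
--         # Repeat for second cell's domain
--         for v2 in list(domains[cell2]):
--             valid = False
--             for v1 in domains[cell1]:
--                 if constraint == 1 and abs(v1 - v2) == 1:
--                     valid = True
--                     break
--                 elif constraint == 2 and (v1 == 2 * v2 or v2 == 2 * v1):
--                     valid = True
--                     break
--             if not valid:
--                 domains[cell2].remove(v2)
--                 changed = True
--
--     return changed
-- ===== SOURCE B (Python) =====
-- def check_kropki(relations, domains, changed):
--     # Forward image propagation: instead of searching, per candidate, for a
--     # supporting partner value, project the constraint relation onto the partner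
--     # domain once (the image set of all values it supports) and keep exactly the
--     # candidates lying in that image.
--     for (cell1, cell2), constraint in relations.items():
--         for cell_a, cell_b in ((cell1, cell2), (cell2, cell1)):
--             image = set()
--             if constraint == 1:
--                 for w in domains[cell_b]:
--                     image.add(w - 1)
--                     image.add(w + 1)
--             elif constraint == 2:
--                 for w in domains[cell_b]:
--                     image.add(2 * w)
--                     if w % 2 == 0:
--                         image.add(w // 2)
--             cur = domains[cell_a]
--             keep = [v for v in cur if v in image]
--             if len(keep) != len(cur):
--                 changed = True
--             cur[:] = keep
--     return changed
-- ===== Notes on version B (the rewrite author's own statement) =====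
-- stated objective: alternative
-- what changed: Reverses the data flow: instead of A's per-candidate backward search for a supporting partner value, B projects the constraint relation forward over the partner domain once, building the image set of all supported values (w-1/w+1, or 2w and w//2 for even w), then keeps exactly the candidates in that image; an unknown constraint yields the empty image, so everything is dropped as in A.
import Mathlib
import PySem

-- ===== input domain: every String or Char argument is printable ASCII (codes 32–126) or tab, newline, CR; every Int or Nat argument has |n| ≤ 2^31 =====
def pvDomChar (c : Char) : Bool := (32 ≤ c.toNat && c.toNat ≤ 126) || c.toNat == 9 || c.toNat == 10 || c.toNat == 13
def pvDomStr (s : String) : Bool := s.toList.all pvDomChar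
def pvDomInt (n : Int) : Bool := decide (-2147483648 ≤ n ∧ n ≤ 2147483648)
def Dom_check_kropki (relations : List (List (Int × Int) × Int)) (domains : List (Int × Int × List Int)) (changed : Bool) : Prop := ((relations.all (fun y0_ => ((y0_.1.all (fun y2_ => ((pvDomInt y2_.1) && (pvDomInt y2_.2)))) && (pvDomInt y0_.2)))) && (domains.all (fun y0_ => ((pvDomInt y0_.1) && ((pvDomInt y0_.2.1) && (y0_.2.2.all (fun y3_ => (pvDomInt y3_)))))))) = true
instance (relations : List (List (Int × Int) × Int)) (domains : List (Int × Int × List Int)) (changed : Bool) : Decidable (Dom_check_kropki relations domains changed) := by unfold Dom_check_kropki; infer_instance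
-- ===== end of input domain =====

-- B reverses the data flow: it builds the image set of values supported by the partner
-- domain and keeps the candidates lying in it, instead of A's per-candidate inner scan
-- with in-place removals.  Both A and B mutate `domains` in place identically; the
-- equivalence proved here is about the returned Bool only.

-- ===== PORT A =====
-- inner `for v2 in domains[cell2]: ... break` loop
def pvScanA (c v1 : Int) : List Int → Bool
  | [] => false
  | v2 :: rest =>
    if c = 1 ∧ (v1 - v2).natAbs = 1 then true
    else if c = 2 ∧ (v1 = 2 * v2 ∨ v2 = 2 * v1) then true
    else pvScanA c v1 rest

-- list.remove(v): drops the first occurrence (total form; under Pre_ v is present)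
def pvRemove (l : List Int) (v : Int) : List Int := (PySem.List.remove? l v).getD l

-- `for v1 in list(domains[cellA]): ...` pruning cellA against domains[cellB]
def pvPassA (c : Int) (cellA cellB : Int × Int) :
    List Int → PySem.Dict (Int × Int) (List Int) × Bool → PySem.Dict (Int × Int) (List Int) × Bool
  | [], st => st
  | v1 :: rest, st =>
    pvPassA c cellA cellB rest
      (if pvScanA c v1 (st.1.getD cellB []) then st
       else (st.1.modify cellA [] (fun l => pvRemove l v1), true))

-- one relation: the two symmetric pruning loops (a key that is not a pair raises in Python: outside Pre_)
def pvStepA (st : PySem.Dict (Int × Int) (List Int) × Bool) (entry : List (Int × Int) × Int) :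
    PySem.Dict (Int × Int) (List Int) × Bool :=
  match entry.1 with
  | [cell1, cell2] =>
    let st1 := pvPassA entry.2 cell1 cell2 (st.1.getD cell1 []) st
    pvPassA entry.2 cell2 cell1 (st1.1.getD cell2 []) st1
  | _ => st

def check_kropki (relations : List (List (Int × Int) × Int)) (domains : List (Int × Int × List Int)) (changed : Bool) : Bool :=
  let d0 := PySem.Dict.ofList (domains.map (fun e => ((e.1, e.2.1), e.2.2)))
  let rd := PySem.Dict.ofList relations
  (rd.items.foldl pvStepA (d0, changed)).2

-- ===== PORT B =====
-- `image.add(w-1); image.add(w+1)` for one partner value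
def pvImageStep1 (s : PySem.Set Int) (w : Int) : PySem.Set Int :=
  PySem.Set.add (PySem.Set.add s (w - 1)) (w + 1)

-- `image.add(2*w); if w % 2 == 0: image.add(w // 2)`
def pvImageStep2 (s : PySem.Set Int) (w : Int) : PySem.Set Int :=
  let s' := PySem.Set.add s (2 * w)
  if PySem.Int.mod w 2 = 0 then PySem.Set.add s' (PySem.Int.floordiv w 2) else s'

-- the `image` set built from the partner domain
def pvImageB (c : Int) (partner : List Int) : PySem.Set Int :=
  if c = 1 then partner.foldl pvImageStep1 PySem.Set.empty
  else if c = 2 then partner.foldl pvImageStep2 PySem.Set.empty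
  else PySem.Set.empty

-- one relation, one direction: keep the candidates lying in the partner's image
def pvPassB (c : Int) (cellA cellB : Int × Int) (st : PySem.Dict (Int × Int) (List Int) × Bool) :
    PySem.Dict (Int × Int) (List Int) × Bool :=
  let image := pvImageB c (st.1.getD cellB [])
  let cur := st.1.getD cellA []
  let keep := cur.filter (fun v => image.contains v)
  let ch := if keep.length ≠ cur.length then true else st.2
  (st.1.insert cellA keep, ch)

def pvStepB (st : PySem.Dict (Int × Int) (List Int) × Bool) (entry : List (Int × Int) × Int) :
    PySem.Dict (Int × Int) (List Int) × Bool :=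
  match entry.1 with
  | [cell1, cell2] => pvPassB entry.2 cell2 cell1 (pvPassB entry.2 cell1 cell2 st)
  | _ => st

def check_kropki_alt (relations : List (List (Int × Int) × Int)) (domains : List (Int × Int × List Int)) (changed : Bool) : Bool :=
  let d0 := PySem.Dict.ofList (domains.map (fun e => ((e.1, e.2.1), e.2.2)))
  let rd := PySem.Dict.ofList relations
  (rd.items.foldl pvStepB (d0, changed)).2

-- ===== PRECONDITION & SPEC =====
-- Pre_ excludes exactly the inputs where the Python A raises: a relation key that is not
-- a pair (ValueError on unpacking) or that names a cell absent from domains (KeyError).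
def Pre_check_kropki (relations : List (List (Int × Int) × Int)) (domains : List (Int × Int × List Int)) (changed : Bool) : Prop :=
  ∀ p ∈ relations, p.1.length = 2 ∧ ∀ x ∈ p.1, x ∈ domains.map (fun e => (e.1, e.2.1))
instance (relations : List (List (Int × Int) × Int)) (domains : List (Int × Int × List Int)) (changed : Bool) : Decidable (Pre_check_kropki relations domains changed) := by unfold Pre_check_kropki; infer_instance

def pvWitness_check_kropki : (List (List (Int × Int) × Int)) × (List (Int × Int × List Int)) × Bool :=
  ([([(0, 0), (0, 1)], 1)], [(0, 0, [1, 2]), (0, 1, [2, 5])], false)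

def Spec_check_kropki (relations : List (List (Int × Int) × Int)) (domains : List (Int × Int × List Int)) (changed : Bool) (out : Bool) : Prop := out = check_kropki_alt relations domains changed
instance (relations : List (List (Int × Int) × Int)) (domains : List (Int × Int × List Int)) (changed : Bool) (out : Bool) : Decidable (Spec_check_kropki relations domains changed out) := by unfold Spec_check_kropki; infer_instance

-- ===== CLAIM (what is proved, stated in full; the proofs are below) =====
def Claim_equal_check_kropki : Prop := ∀ (relations : List (List (Int × Int) × Int)) (domains : List (Int × Int × List Int)) (changed : Bool), Dom_check_kropki relations domains changed → Pre_check_kropki relations domains changed → Spec_check_kropki relations domains changed (check_kropki relations domains changed)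

-- ===== LEMMAS AND PROOFS =====

-- the compatibility relation both programs test, as one predicate
def pvEdge (c v w : Int) : Bool :=
  decide (c = 1 ∧ (v - w).natAbs = 1) || decide (c = 2 ∧ (v = 2 * w ∨ w = 2 * v))

lemma pvScanA_eq_any (c v : Int) (l : List Int) : pvScanA c v l = l.any (pvEdge c v) := by
  induction l with
  | nil => rfl
  | cons w rest ih =>
    rw [List.any_cons, ← ih]
    simp only [pvScanA]
    split_ifs with h1 h2
    · simp [pvEdge, h1]
    · simp [pvEdge, h2]
    · simp [pvEdge, h1, h2]

lemma pvEdge_symm (c v w : Int) : pvEdge c v w = pvEdge c w v := by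
  rw [Bool.eq_iff_iff]
  simp only [pvEdge, Bool.or_eq_true, decide_eq_true_eq]
  omega

-- dicts observed only through getD
def pvRel (d d' : PySem.Dict (Int × Int) (List Int)) : Prop :=
  ∀ k, d.getD k [] = d'.getD k []

lemma pvRel_refl (d : PySem.Dict (Int × Int) (List Int)) : pvRel d d := fun _ => rfl

lemma pvEdge_iff (c v w : Int) :
    pvEdge c v w = true ↔ ((c = 1 ∧ (v - w).natAbs = 1) ∨ (c = 2 ∧ (v = 2 * w ∨ w = 2 * v))) := by
  simp only [pvEdge, Bool.or_eq_true, decide_eq_true_eq]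

-- membership in the image built by the c = 1 fold
lemma pvMem_foldl1 (l : List Int) :
    ∀ (s : PySem.Set Int) (x : Int),
      x ∈ l.foldl pvImageStep1 s ↔ x ∈ s ∨ ∃ w ∈ l, x = w - 1 ∨ x = w + 1 := by
  induction l with
  | nil => intro s x; simp
  | cons w rest ih =>
    intro s x
    rw [List.foldl_cons, ih]
    simp only [pvImageStep1, PySem.Set.mem_add, List.mem_cons]
    constructor
    · rintro (((h | h) | h) | ⟨u, hu, h⟩)
      · exact Or.inl h
      · exact Or.inr ⟨w, Or.inl rfl, Or.inl h⟩
      · exact Or.inr ⟨w, Or.inl rfl, Or.inr h⟩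
      · exact Or.inr ⟨u, Or.inr hu, h⟩
    · rintro (h | ⟨u, hu | hu, h⟩)
      · exact Or.inl (Or.inl (Or.inl h))
      · subst hu
        rcases h with h | h
        · exact Or.inl (Or.inl (Or.inr h))
        · exact Or.inl (Or.inr h)
      · exact Or.inr ⟨u, hu, h⟩

-- membership in the image built by the c = 2 fold
lemma pvMem_foldl2 (l : List Int) :
    ∀ (s : PySem.Set Int) (x : Int),
      x ∈ l.foldl pvImageStep2 s ↔
        x ∈ s ∨ ∃ w ∈ l, x = 2 * w ∨ (w % 2 = 0 ∧ x = w / 2) := by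
  induction l with
  | nil => intro s x; simp
  | cons w rest ih =>
    intro s x
    rw [List.foldl_cons, ih]
    have hmem : x ∈ pvImageStep2 s w ↔ x ∈ s ∨ x = 2 * w ∨ (w % 2 = 0 ∧ x = w / 2) := by
      simp only [pvImageStep2,
        PySem.Int.mod_eq_emod_of_pos (by omega : (0:Int) < 2),
        PySem.Int.floordiv_eq_ediv_of_pos (by omega : (0:Int) < 2)]
      split_ifs with he
      · simp only [PySem.Set.mem_add]; tauto
      · simp only [PySem.Set.mem_add]; tauto
    rw [hmem]
    simp only [List.mem_cons]
    constructor
    · rintro ((h | h) | ⟨u, hu, h⟩)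
      · exact Or.inl h
      · exact Or.inr ⟨w, Or.inl rfl, h⟩
      · exact Or.inr ⟨u, Or.inr hu, h⟩
    · rintro (h | ⟨u, hu | hu, h⟩)
      · exact Or.inl (Or.inl h)
      · subst hu; exact Or.inl (Or.inr h)
      · exact Or.inr ⟨u, hu, h⟩

-- B's image membership agrees with "some partner value is compatible"
lemma pvImage_contains (c : Int) (partner : List Int) (v : Int) :
    (pvImageB c partner).contains v = partner.any (pvEdge c v) := by
  have hcm : ((pvImageB c partner).contains v = true) ↔ v ∈ pvImageB c partner :=
    List.contains_iff_mem
  rw [Bool.eq_iff_iff, hcm, List.any_eq_true]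
  unfold pvImageB
  split_ifs with hc1 hc2
  · subst hc1
    rw [pvMem_foldl1]
    constructor
    · rintro (h | ⟨w, hw, h⟩)
      · simp [PySem.Set.empty] at h
      · exact ⟨w, hw, (pvEdge_iff 1 v w).mpr (by omega)⟩
    · rintro ⟨w, hw, he⟩
      have := (pvEdge_iff 1 v w).mp he
      exact Or.inr ⟨w, hw, by omega⟩
  · subst hc2
    rw [pvMem_foldl2]
    constructor
    · rintro (h | ⟨w, hw, h⟩)
      · simp [PySem.Set.empty] at h
      · exact ⟨w, hw, (pvEdge_iff 2 v w).mpr (by omega)⟩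
    · rintro ⟨w, hw, he⟩
      have := (pvEdge_iff 2 v w).mp he
      exact Or.inr ⟨w, hw, by omega⟩
  · constructor
    · intro h; simp [PySem.Set.empty] at h
    · rintro ⟨w, _, he⟩
      have := (pvEdge_iff c v w).mp he
      tauto

-- removing the first occurrence of v from pre ++ v :: rest, with v ∉ pre
lemma pvRemove_append (pre rest : List Int) (v : Int) (h : v ∉ pre) :
    pvRemove (pre ++ v :: rest) v = pre ++ rest := by
  rw [pvRemove, PySem.List.remove?_eq_some_erase _ _ (by simp), Option.getD_some,
    List.erase_append_right _ h, List.erase_cons_head]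

lemma length_filter_eq_iff (p : Int → Bool) (l : List Int) :
    ((l.filter p).length = l.length) ↔ ∀ x ∈ l, p x := by
  constructor
  · intro h x hx
    by_contra hpx
    have := (List.length_filter_lt_length_iff_exists (p := p) (l := l)).mpr
      ⟨x, hx, by simpa using hpx⟩
    omega
  · intro h; rw [List.filter_eq_self.mpr h]

-- B's changed update equals "some element was dropped"
lemma pvFlag_eq (p : Int → Bool) (l : List Int) (ch : Bool) :
    (if (l.filter p).length ≠ l.length then true else ch) = (ch || l.any (fun v => !p v)) := by
  by_cases hall : ∀ x ∈ l, p x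
  · rw [if_neg (not_ne_iff.mpr ((length_filter_eq_iff p l).mpr hall))]
    have : l.any (fun v => !p v) = false := by
      simp only [List.any_eq_false, Bool.not_eq_eq_eq_not, Bool.not_true]
      intro x hx
      simp [hall x hx]
    rw [this, Bool.or_false]
  · simp only [not_forall, exists_prop] at hall
    obtain ⟨x, hxl, hpx⟩ := hall
    have hany : l.any (fun v => !p v) = true :=
      List.any_eq_true.mpr ⟨x, hxl, by simp [hpx]⟩
    rw [hany, Bool.or_true, if_pos]
    intro hlen
    exact hpx ((length_filter_eq_iff p l).mp hlen x hxl)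

lemma pvRel_trans {d1 d2 d3 : PySem.Dict (Int × Int) (List Int)}
    (h1 : pvRel d1 d2) (h2 : pvRel d2 d3) : pvRel d1 d3 :=
  fun k => (h1 k).trans (h2 k)

-- A's pruning loop, cellA ≠ cellB: the partner list is fixed, the loop filters
lemma pvPassA_ne (c : Int) (cellA cellB : Int × Int) (hne : cellA ≠ cellB) (M : List Int) :
    ∀ (copy pre : List Int) (d : PySem.Dict (Int × Int) (List Int)) (ch : Bool),
      d.getD cellA [] = pre ++ copy → d.getD cellB [] = M →
      (∀ v ∈ pre, M.any (pvEdge c v)) →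
      pvRel (pvPassA c cellA cellB copy (d, ch)).1
        (d.insert cellA (pre ++ copy.filter (fun v => M.any (pvEdge c v)))) ∧
      (pvPassA c cellA cellB copy (d, ch)).2 = (ch || copy.any (fun v => !M.any (pvEdge c v))) := by
  intro copy
  induction copy with
  | nil =>
    intro pre d ch h1 hM h2
    refine ⟨fun k => ?_, by simp [pvPassA]⟩
    rw [PySem.Dict.getD_insert]
    simp only [pvPassA]
    split_ifs with hk
    · subst hk; simpa using h1
    · rfl
  | cons v rest ih =>
    intro pre d ch h1 hM h2
    simp only [pvPassA, hM, pvScanA_eq_any]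
    by_cases hgood : M.any (pvEdge c v) = true
    · rw [if_pos hgood]
      have := ih (pre ++ [v]) d ch (by simpa using h1)
        hM (by intro x hx
               rcases List.mem_append.mp hx with h | h
               · exact h2 x h
               · rw [List.mem_singleton.mp h]; exact hgood)
      refine ⟨?_, ?_⟩
      · refine pvRel_trans this.1 (fun k => ?_)
        rw [PySem.Dict.getD_insert, PySem.Dict.getD_insert]
        simp [hgood]
      · rw [this.2]
        simp [hgood]
    · rw [if_neg hgood]
      have hvnp : v ∉ pre := fun hv => hgood (h2 v hv)
      set d' := d.modify cellA [] (fun l => pvRemove l v) with hd'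
      have h1' : d'.getD cellA [] = pre ++ rest := by
        rw [hd', PySem.Dict.getD_modify, if_pos rfl, h1, pvRemove_append _ _ _ hvnp]
      have hM' : d'.getD cellB [] = M := by
        rw [hd', PySem.Dict.getD_modify, if_neg hne.symm, hM]
      have := ih pre d' true h1' hM' h2
      refine ⟨?_, ?_⟩
      · refine pvRel_trans this.1 (fun k => ?_)
        rw [PySem.Dict.getD_insert, PySem.Dict.getD_insert]
        split_ifs with hk
        · simp [hgood]
        · rw [hd', PySem.Dict.getD_modify, if_neg hk]
      · rw [this.2]
        simp [hgood]

-- A's pruning loop, cellA = cellB: the list prunes itself; by symmetry of pvEdge the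
-- loop still filters by support in the ORIGINAL list L
lemma pvPassA_self (c : Int) (cellA : Int × Int) (L : List Int) :
    ∀ (copy pre : List Int) (d : PySem.Dict (Int × Int) (List Int)) (ch : Bool),
      d.getD cellA [] = pre ++ copy →
      (∀ v ∈ pre, L.any (pvEdge c v)) →
      (∀ v ∈ pre ++ copy, v ∈ L) →
      (∀ w ∈ L, L.any (pvEdge c w) → w ∈ pre ++ copy) →
      pvRel (pvPassA c cellA cellA copy (d, ch)).1
        (d.insert cellA (pre ++ copy.filter (fun v => L.any (pvEdge c v)))) ∧
      (pvPassA c cellA cellA copy (d, ch)).2 = (ch || copy.any (fun v => !L.any (pvEdge c v))) := by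
  intro copy
  induction copy with
  | nil =>
    intro pre d ch h1 h2 h3 h4
    refine ⟨fun k => ?_, by simp [pvPassA]⟩
    rw [PySem.Dict.getD_insert]
    simp only [pvPassA]
    split_ifs with hk
    · subst hk; simpa using h1
    · rfl
  | cons v rest ih =>
    intro pre d ch h1 h2 h3 h4
    have hvL : v ∈ L := h3 v (by simp)
    have hscan : (d.getD cellA []).any (pvEdge c v) = L.any (pvEdge c v) := by
      rw [Bool.eq_iff_iff, List.any_eq_true, List.any_eq_true]
      constructor
      · rintro ⟨w, hw, he⟩
        exact ⟨w, h3 w (by rw [← h1]; exact hw), he⟩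
      · rintro ⟨w, hwL, he⟩
        have hwgood : L.any (pvEdge c w) = true :=
          List.any_eq_true.mpr ⟨v, hvL, by rw [pvEdge_symm]; exact he⟩
        exact ⟨w, by rw [h1]; exact h4 w hwL hwgood, he⟩
    simp only [pvPassA, pvScanA_eq_any, hscan]
    by_cases hgood : L.any (pvEdge c v) = true
    · rw [if_pos hgood]
      have := ih (pre ++ [v]) d ch (by simpa using h1)
        (by intro x hx
            rcases List.mem_append.mp hx with h | h
            · exact h2 x h
            · rw [List.mem_singleton.mp h]; exact hgood)
        (by intro x hx; apply h3; simpa using hx)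
        (by intro w hw hgw; have := h4 w hw hgw; simpa using this)
      refine ⟨?_, ?_⟩
      · refine pvRel_trans this.1 (fun k => ?_)
        rw [PySem.Dict.getD_insert, PySem.Dict.getD_insert]
        simp [hgood]
      · rw [this.2]; simp [hgood]
    · rw [if_neg hgood]
      have hvnp : v ∉ pre := fun hv => hgood (h2 v hv)
      set d' := d.modify cellA [] (fun l => pvRemove l v) with hd'
      have h1' : d'.getD cellA [] = pre ++ rest := by
        rw [hd', PySem.Dict.getD_modify, if_pos rfl, h1, pvRemove_append _ _ _ hvnp]
      have := ih pre d' true h1'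
        h2
        (by intro x hx
            apply h3
            rcases List.mem_append.mp hx with h | h
            · exact List.mem_append.mpr (Or.inl h)
            · exact List.mem_append.mpr (Or.inr (List.mem_cons_of_mem _ h)))
        (by intro w hw hgw
            have hmem := h4 w hw hgw
            rcases List.mem_append.mp hmem with h | h
            · exact List.mem_append.mpr (Or.inl h)
            · rcases List.mem_cons.mp h with h | h
              · exfalso; rw [h] at hgw; exact hgood hgw
              · exact List.mem_append.mpr (Or.inr h))
      refine ⟨?_, ?_⟩
      · refine pvRel_trans this.1 (fun k => ?_)
        rw [PySem.Dict.getD_insert, PySem.Dict.getD_insert]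
        split_ifs with hk
        · simp [hgood]
        · rw [hd', PySem.Dict.getD_modify, if_neg hk]
      · rw [this.2]; simp [hgood]

-- one direction of one relation: A's loop equals B's image-filter pass, up to pvRel
lemma pvPass_eq (c : Int) (cellA cellB : Int × Int) (d : PySem.Dict (Int × Int) (List Int)) (ch : Bool) :
    pvRel (pvPassA c cellA cellB (d.getD cellA []) (d, ch)).1 (pvPassB c cellA cellB (d, ch)).1 ∧
    (pvPassA c cellA cellB (d.getD cellA []) (d, ch)).2 = (pvPassB c cellA cellB (d, ch)).2 := by
  have hkeep :
      (d.getD cellA []).filter (fun v => (pvImageB c (d.getD cellB [])).contains v)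
        = (d.getD cellA []).filter (fun v => (d.getD cellB []).any (pvEdge c v)) :=
    List.filter_congr (fun v _ => pvImage_contains c (d.getD cellB []) v)
  by_cases hc : cellA = cellB
  · subst hc
    have := pvPassA_self c cellA (d.getD cellA []) (d.getD cellA []) [] d ch
      (by simp) (by simp) (by simp) (by intro w hw _; simpa using hw)
    refine ⟨pvRel_trans this.1 (fun k => ?_), ?_⟩
    · simp only [pvPassB, hkeep]
      rw [List.nil_append]
    · rw [this.2]
      simp only [pvPassB, hkeep]
      rw [pvFlag_eq]
  · have := pvPassA_ne c cellA cellB hc (d.getD cellB []) (d.getD cellA []) [] d ch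
      (by simp) rfl (by simp)
    refine ⟨pvRel_trans this.1 (fun k => ?_), ?_⟩
    · simp only [pvPassB, hkeep]
      rw [List.nil_append]
    · rw [this.2]
      simp only [pvPassB, hkeep]
      rw [pvFlag_eq]

-- pvPassA only observes its state through getD
lemma pvPassA_congr (c : Int) (cellA cellB : Int × Int) :
    ∀ (copy : List Int) (d d' : PySem.Dict (Int × Int) (List Int)) (ch : Bool), pvRel d d' →
      pvRel (pvPassA c cellA cellB copy (d, ch)).1 (pvPassA c cellA cellB copy (d', ch)).1 ∧
      (pvPassA c cellA cellB copy (d, ch)).2 = (pvPassA c cellA cellB copy (d', ch)).2 := by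
  intro copy
  induction copy with
  | nil => intro d d' ch h; exact ⟨h, rfl⟩
  | cons v rest ih =>
    intro d d' ch h
    simp only [pvPassA, h cellB]
    split_ifs with hscan
    · exact ih d d' ch h
    · refine ih _ _ true (fun k => ?_)
      rw [PySem.Dict.getD_modify, PySem.Dict.getD_modify, h cellA]
      split_ifs with hk
      · rfl
      · exact h k

-- one relation preserves the correspondence
lemma pvStep_eq (e : List (Int × Int) × Int) (stA stB : PySem.Dict (Int × Int) (List Int) × Bool)
    (hR : pvRel stA.1 stB.1) (hf : stA.2 = stB.2) :
    pvRel (pvStepA stA e).1 (pvStepB stB e).1 ∧ (pvStepA stA e).2 = (pvStepB stB e).2 := by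
  obtain ⟨dA, chA⟩ := stA
  obtain ⟨dB, chB⟩ := stB
  simp only at hR
  subst hf
  match he : e.1 with
  | [] => simp only [pvStepA, pvStepB, he]; exact ⟨hR, trivial⟩
  | [_] => simp only [pvStepA, pvStepB, he]; exact ⟨hR, trivial⟩
  | _ :: _ :: _ :: _ => simp only [pvStepA, pvStepB, he]; exact ⟨hR, trivial⟩
  | [c1, c2] =>
    simp only [pvStepA, pvStepB, he]
    have hcopy : dA.getD c1 [] = dB.getD c1 [] := hR c1
    have hcongr1 := pvPassA_congr e.2 c1 c2 (dA.getD c1 []) dA dB chA hR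
    have hpass1 := pvPass_eq e.2 c1 c2 dB chA
    rw [hcopy] at hcongr1
    have h1R : pvRel (pvPassA e.2 c1 c2 (dA.getD c1 []) (dA, chA)).1 (pvPassB e.2 c1 c2 (dB, chA)).1 := by
      rw [hcopy]; exact pvRel_trans hcongr1.1 hpass1.1
    have h1f : (pvPassA e.2 c1 c2 (dA.getD c1 []) (dA, chA)).2 = (pvPassB e.2 c1 c2 (dB, chA)).2 := by
      rw [hcopy]; exact hcongr1.2.trans hpass1.2
    set st1 := pvPassA e.2 c1 c2 (dA.getD c1 []) (dA, chA) with hst1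
    set stB1 := pvPassB e.2 c1 c2 (dB, chA) with hstB1
    have hcopy2 : st1.1.getD c2 [] = stB1.1.getD c2 [] := h1R c2
    have hcongr2 := pvPassA_congr e.2 c2 c1 (st1.1.getD c2 []) st1.1 stB1.1 st1.2 h1R
    have hpass2 := pvPass_eq e.2 c2 c1 stB1.1 stB1.2
    refine ⟨?_, ?_⟩
    · have : pvRel (pvPassA e.2 c2 c1 (st1.1.getD c2 []) (st1.1, st1.2)).1
          (pvPassA e.2 c2 c1 (stB1.1.getD c2 []) (stB1.1, stB1.2)).1 := by
        rw [← hcopy2, ← h1f]; exact hcongr2.1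
      exact pvRel_trans this hpass2.1
    · have : (pvPassA e.2 c2 c1 (st1.1.getD c2 []) (st1.1, st1.2)).2
          = (pvPassA e.2 c2 c1 (stB1.1.getD c2 []) (stB1.1, stB1.2)).2 := by
        rw [← hcopy2, ← h1f]; exact hcongr2.2
      exact this.trans hpass2.2

lemma pvFold_eq (items : List (List (Int × Int) × Int)) :
    ∀ (stA stB : PySem.Dict (Int × Int) (List Int) × Bool), pvRel stA.1 stB.1 → stA.2 = stB.2 →
      pvRel (items.foldl pvStepA stA).1 (items.foldl pvStepB stB).1 ∧
      (items.foldl pvStepA stA).2 = (items.foldl pvStepB stB).2 := by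
  induction items with
  | nil => intro stA stB hR hf; exact ⟨hR, hf⟩
  | cons e rest ih =>
    intro stA stB hR hf
    have := pvStep_eq e stA stB hR hf
    exact ih _ _ this.1 this.2

-- ===== VERDICT (by name: the statement is the Claim_ definition above) =====
theorem check_kropki_spec : Claim_equal_check_kropki := by
  intro relations domains changed _ _
  unfold Spec_check_kropki check_kropki check_kropki_alt
  exact (pvFold_eq (PySem.Dict.ofList relations).items _ _ (pvRel_refl _) rfl).2
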